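-- pv_equiv track=rewrite | github.com/CausticH/toy-model-sp2-Crings-2D-structure | Stone-Wales rearrange_testing.py | get_symmetric_equivalents_axial
-- ===== SOURCE A (Python) =====
-- def get_symmetric_equivalents_axial(pos, symmetry):
--     """根据对称性，返回一个轴坐标的所有对称等效点。"""
--     q, r = pos
--     # C6 旋转: (q, r) -> (q+r, -q)
--     # C3 旋转: (q, r) -> (-r, q+r) -> (q+r, -q) ...
--     # C2 旋转: (q, r) -> (-q, -r)
--     # 镜面 (沿 q+r=0): (q, r) -> (-r, -q)
--     equivalents = set()
--     p = (q, r)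
--     if symmetry == 'C6':
--         for _ in range(6):
--             equivalents.add(p)
--             p = (p[0] + p[1], -p[0])
--     elif symmetry == 'C3':
--         for _ in range(3):
--             equivalents.add(p)
--             p = (-p[1], p[0] + p[1])
--     elif symmetry == 'C2':
--         equivalents.add((q, r))
--         equivalents.add((-q, -r))
--     elif symmetry == 'mirror':
--         equivalents.add((q, r))
--         equivalents.add((-r, -q))
--     else:  # C1
--         equivalents.add((q, r))
--     return list(equivalents)
-- ===== SOURCE B (Python) =====
-- # Closed form: every group element as an explicit 2x2 integer matrix, applied
-- # independently to (q, r); no iterated generator application.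
-- _MATS = {
--     'C6': [(1, 0, 0, 1), (1, 1, -1, 0), (0, 1, -1, -1),
--            (-1, 0, 0, -1), (-1, -1, 1, 0), (0, -1, 1, 1)],
--     'C3': [(1, 0, 0, 1), (0, -1, 1, 1), (-1, -1, 1, 0)],
--     'C2': [(1, 0, 0, 1), (-1, 0, 0, -1)],
--     'mirror': [(1, 0, 0, 1), (0, -1, -1, 0)],
-- }
--
-- def get_symmetric_equivalents_axial(pos, symmetry):
--     """根据对称性，返回一个轴坐标的所有对称等效点。"""
--     q, r = pos
--     mats = _MATS.get(symmetry, [(1, 0, 0, 1)])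
--     return list({(a * q + b * r, c * q + d * r) for (a, b, c, d) in mats})
-- ===== Notes on version B (the rewrite author's own statement) =====
-- stated objective: alternative
-- what changed: Replaces A's iterated application of a rotation/mirror generator inside per-symmetry branches by a closed form: a precomputed table of all group-element 2x2 integer matrices per symmetry, each applied independently to (q,r), with one dedup at the end.
import Mathlib
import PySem

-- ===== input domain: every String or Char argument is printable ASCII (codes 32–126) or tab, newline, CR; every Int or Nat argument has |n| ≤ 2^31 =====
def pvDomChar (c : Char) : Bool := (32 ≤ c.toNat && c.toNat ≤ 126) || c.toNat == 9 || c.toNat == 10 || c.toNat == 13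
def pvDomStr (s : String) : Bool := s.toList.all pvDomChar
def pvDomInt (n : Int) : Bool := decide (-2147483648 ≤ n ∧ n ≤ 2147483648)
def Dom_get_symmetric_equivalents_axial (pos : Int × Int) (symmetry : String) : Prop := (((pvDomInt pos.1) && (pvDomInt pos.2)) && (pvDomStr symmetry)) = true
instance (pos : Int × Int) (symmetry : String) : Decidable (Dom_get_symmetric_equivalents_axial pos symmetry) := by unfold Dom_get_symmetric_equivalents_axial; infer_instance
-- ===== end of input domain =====

-- B replaces A's iterated orbit generation by a closed form: each group element is a
-- precomputed 2x2 integer matrix applied independently to (q, r) (simpler, same cost).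
-- Both versions build a Python set; the proved equality is about its PySem.Set element list.

-- ===== PORT A =====
def get_symmetric_equivalents_axial (pos : Int × Int) (symmetry : String) : List (Int × Int) :=
  let q := pos.1
  let r := pos.2
  if symmetry == "C6" then
    ((List.range 6).foldl
      (fun (st : PySem.Set (Int × Int) × (Int × Int)) _ =>
        (PySem.Set.add st.1 st.2, (st.2.1 + st.2.2, -st.2.1)))
      (PySem.Set.empty, (q, r))).1
  else if symmetry == "C3" then
    ((List.range 3).foldl
      (fun (st : PySem.Set (Int × Int) × (Int × Int)) _ =>
        (PySem.Set.add st.1 st.2, (-st.2.2, st.2.1 + st.2.2)))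
      (PySem.Set.empty, (q, r))).1
  else if symmetry == "C2" then
    PySem.Set.add (PySem.Set.add PySem.Set.empty (q, r)) (-q, -r)
  else if symmetry == "mirror" then
    PySem.Set.add (PySem.Set.add PySem.Set.empty (q, r)) (-r, -q)
  else
    PySem.Set.add PySem.Set.empty (q, r)

-- ===== PORT B =====
-- the module-level matrix table _MATS (entries a, b, c, d of each group element)
def pvMats : List (String × List (Int × Int × Int × Int)) :=
  [("C6", [(1, 0, 0, 1), (1, 1, -1, 0), (0, 1, -1, -1),
           (-1, 0, 0, -1), (-1, -1, 1, 0), (0, -1, 1, 1)]),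
   ("C3", [(1, 0, 0, 1), (0, -1, 1, 1), (-1, -1, 1, 0)]),
   ("C2", [(1, 0, 0, 1), (-1, 0, 0, -1)]),
   ("mirror", [(1, 0, 0, 1), (0, -1, -1, 0)])]

-- hand port of dict.get with a default (exact: first match in insertion order)
def pvMatsGet (tbl : List (String × List (Int × Int × Int × Int)))
    (k : String) (dflt : List (Int × Int × Int × Int)) : List (Int × Int × Int × Int) :=
  match tbl with
  | [] => dflt
  | (k', v) :: t => if k == k' then v else pvMatsGet t k dflt

def get_symmetric_equivalents_axial_alt (pos : Int × Int) (symmetry : String) : List (Int × Int) :=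
  let q := pos.1
  let r := pos.2
  let mats := pvMatsGet pvMats symmetry [(1, 0, 0, 1)]
  PySem.Set.ofList (mats.map (fun m => (m.1 * q + m.2.1 * r, m.2.2.1 * q + m.2.2.2 * r)))

-- ===== PRECONDITION & SPEC =====
def Spec_get_symmetric_equivalents_axial (pos : Int × Int) (symmetry : String) (out : List (Int × Int)) : Prop := out = get_symmetric_equivalents_axial_alt pos symmetry
instance (pos : Int × Int) (symmetry : String) (out : List (Int × Int)) : Decidable (Spec_get_symmetric_equivalents_axial pos symmetry out) := by unfold Spec_get_symmetric_equivalents_axial; infer_instance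

-- ===== CLAIM =====
def Claim_equal_get_symmetric_equivalents_axial : Prop := ∀ (pos : Int × Int) (symmetry : String), Dom_get_symmetric_equivalents_axial pos symmetry → Spec_get_symmetric_equivalents_axial pos symmetry (get_symmetric_equivalents_axial pos symmetry)

-- ===== LEMMAS AND PROOFS =====
theorem get_symmetric_equivalents_axial_eq (pos : Int × Int) (symmetry : String) :
    get_symmetric_equivalents_axial pos symmetry = get_symmetric_equivalents_axial_alt pos symmetry := by
  obtain ⟨q, r⟩ := pos
  unfold get_symmetric_equivalents_axial get_symmetric_equivalents_axial_alt
  by_cases h6 : symmetry = "C6"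
  · subst h6
    simp [pvMatsGet, pvMats, PySem.Set.ofList, List.range_succ, List.foldl]
    ring_nf
  · by_cases h3 : symmetry = "C3"
    · subst h3
      simp [pvMatsGet, pvMats, PySem.Set.ofList, List.range_succ, List.foldl]
      ring_nf
    · by_cases h2 : symmetry = "C2"
      · subst h2
        simp [pvMatsGet, pvMats, PySem.Set.ofList, List.foldl]
      · by_cases hm : symmetry = "mirror"
        · subst hm
          simp [pvMatsGet, pvMats, PySem.Set.ofList, List.foldl]
        · simp [pvMatsGet, pvMats, beq_iff_eq, h6, h3, h2, hm, PySem.Set.ofList,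
            List.foldl, PySem.Set.add, PySem.Set.empty]

-- ===== VERDICT =====
theorem get_symmetric_equivalents_axial_spec : Claim_equal_get_symmetric_equivalents_axial := by
  intro pos symmetry _
  exact get_symmetric_equivalents_axial_eq pos symmetry
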